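-- pv_equiv track=rewrite | github.com/Fordlador/data_analytics_projects | Папка/yaml.py | env_to_yaml
-- ===== SOURCE A (Python) =====
-- from collections import OrderedDict
-- from typing import List, Dict
--
-- def env_to_yaml(env_list: str) -> str:
--     def parse_env(env: List[str]) -> Dict[str, str]:
--         nested_dict = OrderedDict()
--         for entry in env:
--             key, value = entry.split('=')
--             parts = key.split('.')
--             current_dict = nested_dict
--             for part in parts[:-1]:
--                 if part not in current_dict:
--                     current_dict[part] = OrderedDict()
--                 current_dict = current_dict[part]
--             current_dict[parts[-1]] = value
--         return nested_dict
--
--     def yaml_dump(d: Dict[str, str], indent: int = 0) -> str: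
--         result = ""
--         indentation = ' ' * indent
--         for key, value in d.items():
--             if isinstance(value, dict):
--                 result += f"{indentation}{key}:\n{yaml_dump(value, indent + 2)}"
--             else:
--                 result += f"{indentation}{key}: {value}\n"
--         return result
--
--     env = env_list.strip().split('\n')
--     env_dict = parse_env(env)
--     yaml_text = yaml_dump(env_dict)
--     return yaml_text
-- ===== SOURCE B (Python) =====
-- def env_to_yaml(env_list: str) -> str:
--     # Render directly from (path, value) pairs by recursive group-by-head,
--     # without building an intermediate nested dict.
--     def render(entries, indent):
--         out = []
--         while entries:
--             head = entries[0][0][0]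
--             grp = [e for e in entries if e[0][0] == head]
--             entries = [e for e in entries if e[0][0] != head]
--             pad = ' ' * indent
--             last_path, last_val = grp[-1]
--             if len(last_path) == 1:
--                 out.append(f"{pad}{head}: {last_val}\n")
--             else:
--                 out.append(f"{pad}{head}:\n")
--                 out.append(render([(p[1:], v) for p, v in grp], indent + 2))
--         return ''.join(out)
--
--     entries = []
--     for line in env_list.strip().split('\n'):
--         key, value = line.split('=')
--         entries.append((key.split('.'), value))
--     return render(entries, 0)
-- ===== Notes on version B (the rewrite author's own statement) =====
-- stated objective: alternative
-- what changed: B never builds the nested OrderedDict: it renders the YAML text directly from the list of (dotted-path, value) pairs by a recursive group-by-first-component pass (last entry of a group decides scalar vs sub-block), instead of A's build-a-trie-then-recursively-dump.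
import Mathlib
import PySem

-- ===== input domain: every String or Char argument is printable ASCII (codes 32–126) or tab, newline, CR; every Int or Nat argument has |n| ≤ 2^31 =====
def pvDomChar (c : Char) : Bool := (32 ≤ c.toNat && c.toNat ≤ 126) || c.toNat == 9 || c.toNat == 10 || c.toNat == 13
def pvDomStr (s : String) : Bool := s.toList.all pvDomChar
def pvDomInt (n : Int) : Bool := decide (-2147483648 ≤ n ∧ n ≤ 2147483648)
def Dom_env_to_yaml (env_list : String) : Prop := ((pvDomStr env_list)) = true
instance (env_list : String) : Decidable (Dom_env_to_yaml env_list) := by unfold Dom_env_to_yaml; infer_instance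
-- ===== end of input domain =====

-- B renders the YAML directly from the (dotted-path, value) pairs by recursive group-by-first-component,
-- never building A's nested dict (objective: alternative algorithm, same output byte for byte).

-- ===== PORT A =====
-- the nested OrderedDict of A: values are either scalars (strings) or sub-dicts, in insertion order
mutual
inductive YVal : Type where
  | s : List Char → YVal
  | d : YDict → YVal
inductive YDict : Type where
  | nil : YDict
  | cons : List Char → YVal → YDict → YDict
end

-- dict lookup (first match; keys are unique)
def getVal : YDict → List Char → Option YVal
  | .nil, _ => none
  | .cons k v r, key => if k = key then some v else getVal r key

-- dict assignment: overwrite in place, else append (OrderedDict semantics)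
def setKey : YDict → List Char → YVal → YDict
  | .nil, key, v => .cons key v .nil
  | .cons k w r, key, v => if k = key then .cons k v r else .cons k w (setKey r key v)

-- the body of parse_env's inner loop: walk parts[:-1] creating sub-dicts, then assign parts[-1]
def insertPath : YDict → List (List Char) → List Char → YDict
  | dct, [], _ => dct          -- unreachable: str.split always yields at least one part
  | dct, [last], v => setKey dct last (YVal.s v)
  | dct, p :: q :: rest, v =>
      -- Python raises TypeError when a scalar sits at p; such inputs are outside Pre_
      let child : YDict := match getVal dct p with
        | some (YVal.d dd) => dd
        | _ => YDict.nil
      setKey dct p (YVal.d (insertPath child (q :: rest) v))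

-- yaml_dump: recursive dump of the nested dict
def yamlDump : YDict → Nat → List Char
  | .nil, _ => []
  | .cons k (YVal.s v) r, ind =>
      (List.replicate ind ' ' ++ k ++ [':', ' '] ++ v ++ ['\n']) ++ yamlDump r ind
  | .cons k (YVal.d dd) r, ind =>
      (List.replicate ind ' ' ++ k ++ [':', '\n'] ++ yamlDump dd (ind + 2)) ++ yamlDump r ind

def env_to_yaml (env_list : String) : String :=
  let env := PySem.Chars.splitOn (PySem.Chars.strip env_list.toList) ['\n']
  let env_dict := env.foldl (fun dct entry =>
      let kv := PySem.Chars.splitOn entry ['=']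
      let key := kv.getD 0 []
      let value := kv.getD 1 []
      insertPath dct (PySem.Chars.splitOn key ['.']) value) YDict.nil
  String.ofList (yamlDump env_dict 0)

-- ===== PORT B =====
abbrev Entry := List (List Char) × List Char

-- the entries whose dotted path starts with head h / the remaining ones
def grpOf (h : List Char) (tl : List Entry) : List Entry :=
  tl.filter (fun e => e.1.headD [] == h)
def restOf (h : List Char) (tl : List Entry) : List Entry :=
  tl.filter (fun e => e.1.headD [] != h)

-- termination measure for render: total path length plus number of entries
def pmeas (es : List Entry) : Nat := (es.map (fun e => e.1.length)).sum + es.length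

-- group-by-first-path-component renderer (B): emit the whole group for the leading
-- head, then recurse on the remaining entries.  The fuel argument is only a
-- totality guard (each recursive call strictly shrinks pmeas, so fuel = pmeas
-- entries at the top call is never exhausted).
def render : Nat → List Entry → Nat → List Char
  | 0, _, _ => []
  | _ + 1, [], _ => []
  | fuel + 1, ([], _) :: tl, ind => render fuel tl ind   -- Python B raises IndexError here; unreachable under Pre_
  | fuel + 1, ((h :: t), v) :: tl, ind =>
      let grp : List Entry := ((h :: t), v) :: grpOf h tl
      let pad := List.replicate ind ' '
      let last := grp.getLastD ([], [])
      if last.1.length = 1 then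
        (pad ++ h ++ [':', ' '] ++ last.2 ++ ['\n']) ++ render fuel (restOf h tl) ind
      else
        (pad ++ h ++ [':', '\n']) ++ render fuel (grp.map (fun e => (e.1.tail, e.2))) (ind + 2) ++
          render fuel (restOf h tl) ind

def env_to_yaml_alt (env_list : String) : String :=
  let lines := PySem.Chars.splitOn (PySem.Chars.strip env_list.toList) ['\n']
  let entries : List Entry := lines.map (fun l =>
      let kv := PySem.Chars.splitOn l ['=']
      (PySem.Chars.splitOn (kv.getD 0 []) ['.'], kv.getD 1 []))
  String.ofList (render (pmeas entries) entries 0)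

-- ===== PRECONDITION & SPEC =====
-- the dotted key paths of the lines, as the ports read them
def keyPaths (env_list : String) : List (List (List Char)) :=
  (PySem.Chars.splitOn (PySem.Chars.strip env_list.toList) ['\n']).map
    (fun l => PySem.Chars.splitOn ((PySem.Chars.splitOn l ['=']).getD 0 []) ['.'])

-- Pre_ excludes exactly the inputs on which A raises: a line without exactly one '='
-- (ValueError on unpacking), or an earlier key that is a proper dotted prefix of a later
-- key (descending through the scalar stored there raises TypeError).
def Pre_env_to_yaml (env_list : String) : Prop :=
  (∀ l ∈ PySem.Chars.splitOn (PySem.Chars.strip env_list.toList) ['\n'],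
      PySem.Chars.count l ['='] = 1) ∧
  List.Pairwise (fun a b => ¬(a <+: b ∧ a.length < b.length)) (keyPaths env_list)

instance (env_list : String) : Decidable (Pre_env_to_yaml env_list) := by
  unfold Pre_env_to_yaml; infer_instance

def pvWitness_env_to_yaml : String := "a=b"

def Spec_env_to_yaml (env_list : String) (out : String) : Prop := out = env_to_yaml_alt env_list
instance (env_list : String) (out : String) : Decidable (Spec_env_to_yaml env_list out) := by
  unfold Spec_env_to_yaml; infer_instance

-- ===== CLAIM (what is proved, stated in full; the proofs are below) =====
def Claim_equal_env_to_yaml : Prop := ∀ (env_list : String), Dom_env_to_yaml env_list → Pre_env_to_yaml env_list → Spec_env_to_yaml env_list (env_to_yaml env_list)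

-- ===== LEMMAS AND PROOFS =====

theorem pmeas_cons (e : Entry) (es : List Entry) :
    pmeas (e :: es) = e.1.length + 1 + pmeas es := by
  simp [pmeas]; omega

theorem pmeas_sublist {s t : List Entry} (h : s.Sublist t) : pmeas s ≤ pmeas t := by
  induction h with
  | slnil => exact le_refl _
  | cons a _ ih => rw [pmeas_cons]; omega
  | cons₂ a _ ih => rw [pmeas_cons, pmeas_cons]; omega

theorem pmeas_tail_map (es : List Entry) :
    pmeas (es.map (fun e => (e.1.tail, e.2))) ≤ pmeas es := by
  induction es with
  | nil => simp
  | cons e tl ih =>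
      obtain ⟨p, v⟩ := e
      simp only [List.map_cons, pmeas, List.sum_cons, List.length_cons,
        List.map_map] at ih ⊢
      have : p.tail.length ≤ p.length := by cases p <;> simp
      omega

theorem pmeas_grp_lt (h : List Char) (t : List (List Char)) (v : List Char) (tl : List Entry) :
    pmeas ((((h :: t), v) :: grpOf h tl).map (fun e => (e.1.tail, e.2))) <
      pmeas (((h :: t), v) :: tl) := by
  have h1 : pmeas (grpOf h tl) ≤ pmeas tl := pmeas_sublist (List.filter_sublist)
  have h2 : pmeas ((grpOf h tl).map (fun e => (e.1.tail, e.2))) ≤ pmeas (grpOf h tl) :=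
    pmeas_tail_map _
  have h3 : pmeas ((((h :: t), v) :: grpOf h tl).map (fun e => (e.1.tail, e.2)))
      = t.length + 1 + pmeas ((grpOf h tl).map (fun e => (e.1.tail, e.2))) := by
    rw [List.map_cons, pmeas_cons]
    rfl
  have h4 : pmeas ((((h :: t), v) : Entry) :: tl) = t.length + 1 + 1 + pmeas tl := by
    rw [pmeas_cons]
    rfl
  rw [h3, h4]
  omega

theorem pmeas_rest_lt (e : Entry) (h : List Char) (tl : List Entry) :
    pmeas (restOf h tl) < pmeas (e :: tl) := by
  have h1 : pmeas (restOf h tl) ≤ pmeas tl := pmeas_sublist (List.filter_sublist)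
  rw [pmeas_cons]; omega

theorem pmeas_skip_lt (e : Entry) (tl : List Entry) : pmeas tl < pmeas (e :: tl) := by
  rw [pmeas_cons]; omega

theorem splitOn_go_ne_nil (sep : List Char) (fuel : Nat) (l cur : List Char)
    (acc : List (List Char)) : PySem.Chars.splitOn.go sep fuel l cur acc ≠ [] := by
  induction fuel generalizing l cur acc with
  | zero => simp [PySem.Chars.splitOn.go]
  | succ n ih =>
      cases l with
      | nil => simp [PySem.Chars.splitOn.go]
      | cons c rest =>
          rw [PySem.Chars.splitOn.go]
          split <;> apply ih

theorem splitOn_ne_nil (cs sep : List Char) : PySem.Chars.splitOn cs sep ≠ [] := by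
  unfold PySem.Chars.splitOn; apply splitOn_go_ne_nil

-- the trie that A's fold builds, expressed by B's grouping recursion
def trieOf : List Entry → YDict
  | [] => .nil
  | ([], _) :: tl => trieOf tl
  | ((h :: t), v) :: tl =>
      let grp : List Entry := ((h :: t), v) :: grpOf h tl
      let last := grp.getLastD ([], [])
      YDict.cons h
        (if last.1.length = 1 then YVal.s last.2
         else YVal.d (trieOf (grp.map (fun e => (e.1.tail, e.2)))))
        (trieOf (restOf h tl))
termination_by es => pmeas es
decreasing_by
  all_goals first
    | exact pmeas_grp_lt _ _ _ _
    | exact pmeas_rest_lt _ _ _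
    | exact pmeas_skip_lt _ _

-- no path is empty and no earlier path is a proper prefix of a later one
def PathInv (es : List Entry) : Prop :=
  (∀ e ∈ es, e.1 ≠ []) ∧
  List.Pairwise (fun a b : Entry => ¬(a.1 <+: b.1 ∧ a.1.length < b.1.length)) es

theorem getLastD_mem (l : List Entry) (d : Entry) : l.getLastD d ∈ d :: l := by
  induction l generalizing d with
  | nil => simp
  | cons a l ih =>
      rw [List.getLastD_cons]
      rcases List.mem_cons.1 (ih a) with h | h
      · rw [h]
        exact List.mem_cons_of_mem _ List.mem_cons_self
      · exact List.mem_cons_of_mem _ (List.mem_cons_of_mem _ h)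

theorem getLastD_cons_mem (x : Entry) (F : List Entry) (d : Entry) :
    (x :: F).getLastD d ∈ x :: F := by
  rw [List.getLastD_cons]; exact getLastD_mem F x

theorem pathInv_sublist {s t : List Entry} (hsub : s.Sublist t) (h : PathInv t) : PathInv s :=
  ⟨fun e he => h.1 e (hsub.subset he), h.2.sublist hsub⟩

theorem grp_head {h : List Char} {tl : List Entry} (hne : ∀ e ∈ tl, e.1 ≠ []) :
    ∀ x ∈ grpOf h tl, ∃ tx, x.1 = h :: tx := by
  intro x hx
  rw [grpOf, List.mem_filter] at hx
  obtain ⟨hx1, hx2⟩ := hx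
  cases hc : x.1 with
  | nil => exact absurd hc (hne x hx1)
  | cons a b =>
      rw [hc] at hx2
      simp only [List.headD_cons, beq_iff_eq] at hx2
      exact ⟨b, by rw [hx2]⟩

theorem grpOf_append_sing (h : List Char) (tl : List Entry) (e : Entry) :
    grpOf h (tl ++ [e]) = grpOf h tl ++ (if e.1.headD [] == h then [e] else []) := by
  rw [grpOf, grpOf, List.filter_append]
  congr 1
  simp only [List.filter]
  split <;> simp_all

theorem restOf_append_sing (h : List Char) (tl : List Entry) (e : Entry) :
    restOf h (tl ++ [e]) = restOf h tl ++ (if e.1.headD [] == h then [] else [e]) := by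
  rw [restOf, restOf, List.filter_append]
  congr 1
  simp only [List.filter, bne]
  split <;> simp_all

theorem grpOf_sublist (h : List Char) (tl : List Entry) : (grpOf h tl).Sublist tl :=
  List.filter_sublist
theorem restOf_sublist (h : List Char) (tl : List Entry) : (restOf h tl).Sublist tl :=
  List.filter_sublist

theorem insertPath_cons_hit (k : List Char) (TA D : YDict) (q : List Char)
    (r : List (List Char)) (v : List Char) :
    insertPath (YDict.cons k (YVal.d TA) D) (k :: q :: r) v
      = YDict.cons k (YVal.d (insertPath TA (q :: r) v)) D := by
  simp [insertPath, getVal, setKey]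

theorem dump_trieOf_eq_render (fuel : Nat) : ∀ es : List Entry, pmeas es ≤ fuel →
    ∀ ind : Nat, yamlDump (trieOf es) ind = render fuel es ind := by
  induction fuel with
  | zero =>
      intro es h ind
      have hnil : es = [] := by
        cases es with
        | nil => rfl
        | cons e tl => rw [pmeas_cons] at h; omega
      subst hnil
      simp [trieOf, render, yamlDump]
  | succ n ih =>
      intro es hle ind
      match es with
      | [] => simp [trieOf, render, yamlDump]
      | ([], v) :: tl =>
          simp only [trieOf, render]
          exact ih tl (Nat.lt_succ_iff.mp (lt_of_lt_of_le (pmeas_skip_lt (([], v) : Entry) tl) hle)) ind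
      | ((h :: t), v) :: tl =>
          simp only [trieOf, render]
          split
          · rw [yamlDump]
            rw [ih (restOf h tl)
              (Nat.lt_succ_iff.mp (lt_of_lt_of_le (pmeas_rest_lt (((h :: t), v) : Entry) h tl) hle)) ind]
          · rw [yamlDump]
            rw [ih _ (Nat.lt_succ_iff.mp (lt_of_lt_of_le (pmeas_grp_lt h t v tl) hle)) (ind + 2),
              ih (restOf h tl)
                (Nat.lt_succ_iff.mp (lt_of_lt_of_le (pmeas_rest_lt (((h :: t), v) : Entry) h tl) hle)) ind]

theorem trieOf_singleton (p : List (List Char)) (v : List Char) :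
    trieOf [(p, v)] = insertPath YDict.nil p v := by
  induction p with
  | nil => simp [trieOf, insertPath]
  | cons h t ih =>
      cases t with
      | nil => simp [trieOf, insertPath, grpOf, restOf, setKey]
      | cons q r =>
          simp only [insertPath, getVal, setKey]
          rw [← ih]
          conv_lhs => rw [trieOf]
          simp [trieOf, grpOf, restOf]

theorem insertPath_cons_ne (k : List Char) (w : YVal) (D : YDict) (hp : List Char)
    (tp : List (List Char)) (v : List Char) (hne : hp ≠ k) :
    insertPath (YDict.cons k w D) (hp :: tp) v = YDict.cons k w (insertPath D (hp :: tp) v) := by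
  have hne' : ¬ k = hp := fun hh => hne hh.symm
  cases tp with
  | nil => simp [insertPath, setKey, hne']
  | cons q r => simp [insertPath, getVal, setKey, hne']

theorem trieOf_snoc (n : Nat) : ∀ (es : List Entry) (e : Entry), pmeas es < n →
    PathInv (es ++ [e]) → trieOf (es ++ [e]) = insertPath (trieOf es) e.1 e.2 := by
  induction n with
  | zero => intro es e h _; exact absurd h (Nat.not_lt_zero _)
  | succ n ih =>
      intro es e hlt hInv
      obtain ⟨p, v⟩ := e
      have hpne : p ≠ [] := hInv.1 (p, v) (by simp)
      cases es with
      | nil =>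
          have h0 : trieOf ([] : List Entry) = YDict.nil := by simp [trieOf]
          rw [List.nil_append, h0]
          exact trieOf_singleton p v
      | cons e0 tl =>
          obtain ⟨p0, v0⟩ := e0
          have hp0 : p0 ≠ [] := hInv.1 (p0, v0) (by simp)
          cases p0 with
          | nil => exact absurd rfl hp0
          | cons h t =>
          cases p with
          | nil => exact absurd rfl hpne
          | cons hp tp =>
          have hInv_es : PathInv ((((h :: t), v0)) :: tl) :=
            pathInv_sublist (List.sublist_append_left _ _) hInv
          have hne_tl : ∀ x ∈ tl, x.1 ≠ [] := fun x hx =>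
            hInv_es.1 x (List.mem_cons_of_mem _ hx)
          have hcross : ∀ a ∈ (((h :: t), v0)) :: tl,
              ¬(a.1 <+: (hp :: tp) ∧ a.1.length < (hp :: tp).length) := by
            have h2 := hInv.2
            rw [List.pairwise_append] at h2
            intro a ha
            exact h2.2.2 a ha ((hp :: tp, v) : Entry) (by simp)
          by_cases hh : hp = h
          · subst hh
            have hgrp : grpOf hp (tl ++ [((hp :: tp, v) : Entry)])
                = grpOf hp tl ++ [(hp :: tp, v)] := by
              rw [grpOf_append_sing]; simp
            have hrest : restOf hp (tl ++ [((hp :: tp, v) : Entry)]) = restOf hp tl := by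
              rw [restOf_append_sing]; simp
            cases tp with
            | nil =>
                rw [List.cons_append]
                simp only [trieOf, hgrp, hrest]
                rw [← List.cons_append, List.getLastD_concat]
                rw [if_pos (by simp)]
                simp [insertPath, setKey]
            | cons q r =>
                -- the last entry of the old leading group is not a scalar
                have hlastA : ((((hp :: t), v0) : Entry) :: grpOf hp tl).getLastD ([], []) ∈
                    (((hp :: t), v0) : Entry) :: grpOf hp tl := getLastD_cons_mem _ _ _
                have hheads : ∀ x ∈ (((hp :: t), v0) : Entry) :: grpOf hp tl,
                    ∃ tx, x.1 = hp :: tx := by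
                  intro x hx
                  rcases List.mem_cons.1 hx with rfl | hx'
                  · exact ⟨t, rfl⟩
                  · exact grp_head hne_tl x hx'
                have hmem_es : ∀ x ∈ (((hp :: t), v0) : Entry) :: grpOf hp tl,
                    x ∈ (((hp :: t), v0) : Entry) :: tl := by
                  intro x hx
                  rcases List.mem_cons.1 hx with rfl | hx'
                  · exact List.mem_cons_self
                  · exact List.mem_cons_of_mem _ ((grpOf_sublist hp tl).subset hx')
                -- every member of the leading group has a path of length ≥ 2
                have hlong : ∀ x ∈ (((hp :: t), v0) : Entry) :: grpOf hp tl,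
                    x.1.length ≠ 1 := by
                  intro x hx hcon
                  obtain ⟨tx, htx⟩ := hheads x hx
                  have htx0 : tx = [] := by
                    rw [htx] at hcon; simpa using hcon
                  refine hcross x (hmem_es x hx) ⟨?_, ?_⟩
                  · rw [htx, htx0]
                    exact ⟨q :: r, rfl⟩
                  · rw [htx, htx0]; simp
                have hvalA : ¬((((((hp :: t), v0) : Entry) :: grpOf hp tl).getLastD
                    ([], [])).1.length = 1) := hlong _ hlastA
                have hboundg : pmeas (((((hp :: t), v0) : Entry) :: grpOf hp tl).map
                    (fun e => (e.1.tail, e.2))) < n :=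
                  lt_of_lt_of_le (pmeas_grp_lt hp t v0 tl) (Nat.lt_succ_iff.mp hlt)
                have hInvg : PathInv ((((((hp :: t), v0) : Entry) :: grpOf hp tl).map
                    (fun e => (e.1.tail, e.2))) ++ [((q :: r, v) : Entry)]) := by
                  constructor
                  · intro x hx
                    rcases List.mem_append.1 hx with hx' | hx'
                    · obtain ⟨a, ha, rfl⟩ := List.mem_map.1 hx'
                      obtain ⟨ta, hta⟩ := hheads a ha
                      intro hcon
                      have hta0 : ta = [] := by
                        rw [hta] at hcon; simpa using hcon
                      exact hlong a ha (by rw [hta, hta0]; rfl)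
                    · simp only [List.mem_singleton] at hx'
                      rw [hx']
                      simp
                  · rw [List.pairwise_append]
                    refine ⟨?_, by simp, ?_⟩
                    · have hpw : List.Pairwise
                          (fun a b : Entry => ¬(a.1 <+: b.1 ∧ a.1.length < b.1.length))
                          ((((hp :: t), v0) : Entry) :: grpOf hp tl) :=
                        hInv_es.2.sublist ((grpOf_sublist hp tl).cons₂ _)
                      rw [List.pairwise_map]
                      refine hpw.imp_of_mem ?_
                      intro a b ha hb hR hcon
                      obtain ⟨ta, hta⟩ := hheads a ha
                      obtain ⟨tb, htb⟩ := hheads b hb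
                      refine hR ⟨?_, ?_⟩
                      · rw [hta, htb]
                        rw [hta, htb] at hcon
                        exact List.cons_prefix_cons.2 ⟨rfl, by simpa using hcon.1⟩
                      · have := hcon.2
                        rw [hta, htb]
                        rw [hta, htb] at this
                        simpa using this
                    · intro x hx b hb
                      obtain ⟨a, ha, rfl⟩ := List.mem_map.1 hx
                      obtain ⟨ta, hta⟩ := hheads a ha
                      simp only [List.mem_singleton] at hb
                      subst hb
                      intro hcon
                      refine hcross a (hmem_es a ha) ⟨?_, ?_⟩
                      · rw [hta]
                        rw [hta] at hcon
                        exact List.cons_prefix_cons.2 ⟨rfl, by simpa using hcon.1⟩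
                      · have := hcon.2
                        rw [hta]
                        rw [hta] at this
                        simpa using this
                have hrec := ih _ ((q :: r, v) : Entry) hboundg hInvg
                simp only [List.map_cons, List.tail_cons] at hrec
                rw [List.cons_append]
                simp only [trieOf, hgrp, hrest]
                rw [← List.cons_append, List.getLastD_concat]
                have hc1 : ¬((((hp :: q :: r : List (List Char)), v) : Entry).1.length = 1) := by
                  simp
                rw [if_neg hc1, if_neg hvalA, List.map_append]
                simp only [List.map_cons, List.map_nil, List.tail_cons]
                rw [hrec]
                exact (insertPath_cons_hit hp _ _ q r v).symm
          · -- e starts a later group: it moves into the rest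
            have hh' : ¬ ((hp :: tp : List (List Char)).headD [] == h) = true := by
              simpa using hh
            have hgrp : grpOf h (tl ++ [((hp :: tp, v) : Entry)]) = grpOf h tl := by
              rw [grpOf_append_sing]
              simp only [hh']
              simp
            have hrest : restOf h (tl ++ [((hp :: tp, v) : Entry)])
                = restOf h tl ++ [(hp :: tp, v)] := by
              rw [restOf_append_sing]
              simp only [hh']
              simp
            rw [List.cons_append]
            simp only [trieOf, hgrp, hrest]
            rw [insertPath_cons_ne _ _ _ _ _ _ hh]
            congr 1
            have hrec := ih (restOf h tl) ((hp :: tp, v) : Entry)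
              (by have h5 := pmeas_rest_lt (((h :: t), v0) : Entry) h tl; omega)
              (pathInv_sublist
                (List.Sublist.append
                  ((restOf_sublist h tl).trans (List.sublist_cons_self _ _))
                  (List.Sublist.refl _)) hInv)
            exact hrec

theorem fold_eq_trieOf (es : List Entry) (hInv : PathInv es) :
    es.foldl (fun dct e => insertPath dct e.1 e.2) YDict.nil = trieOf es := by
  induction es using List.reverseRecOn with
  | nil => simp [trieOf]
  | append_singleton es e ih =>
      have hInv' : PathInv es := pathInv_sublist (List.sublist_append_left _ _) hInv
      rw [List.foldl_append, List.foldl_cons, List.foldl_nil, ih hInv',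
        ← trieOf_snoc (pmeas es + 1) es e (by omega) hInv]

def esOf (env_list : String) : List Entry :=
  (PySem.Chars.splitOn (PySem.Chars.strip env_list.toList) ['\n']).map
    (fun l => (PySem.Chars.splitOn ((PySem.Chars.splitOn l ['=']).getD 0 []) ['.'],
      (PySem.Chars.splitOn l ['=']).getD 1 []))

theorem pairs_of_pre (env_list : String) (hpre : Pre_env_to_yaml env_list) :
    PathInv (esOf env_list) := by
  constructor
  · intro e he
    rw [esOf] at he
    obtain ⟨l, hl, rfl⟩ := List.mem_map.1 he
    exact splitOn_ne_nil _ _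
  · have h2 := hpre.2
    rw [keyPaths, List.pairwise_map] at h2
    rw [esOf, List.pairwise_map]
    exact h2

theorem env_to_yaml_spec' (env_list : String) (hpre : Pre_env_to_yaml env_list) :
    env_to_yaml env_list = env_to_yaml_alt env_list := by
  have hInv := pairs_of_pre env_list hpre
  have hfold : (PySem.Chars.splitOn (PySem.Chars.strip env_list.toList) ['\n']).foldl
      (fun dct entry =>
        insertPath dct (PySem.Chars.splitOn ((PySem.Chars.splitOn entry ['=']).getD 0 []) ['.'])
          ((PySem.Chars.splitOn entry ['=']).getD 1 [])) YDict.nil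
      = (esOf env_list).foldl (fun dct e => insertPath dct e.1 e.2) YDict.nil := by
    conv_rhs => rw [esOf, List.foldl_map]
  show String.ofList (yamlDump
      ((PySem.Chars.splitOn (PySem.Chars.strip env_list.toList) ['\n']).foldl
        (fun dct entry =>
          insertPath dct
            (PySem.Chars.splitOn ((PySem.Chars.splitOn entry ['=']).getD 0 []) ['.'])
            ((PySem.Chars.splitOn entry ['=']).getD 1 [])) YDict.nil) 0)
    = String.ofList (render (pmeas (esOf env_list)) (esOf env_list) 0)
  rw [hfold, fold_eq_trieOf _ hInv,
    dump_trieOf_eq_render (pmeas (esOf env_list)) _ (le_refl _) 0]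

-- ===== VERDICT (by name: the statement is the Claim_ definition above) =====
theorem env_to_yaml_spec : Claim_equal_env_to_yaml := by
  intro env_list _hdom hpre
  unfold Spec_env_to_yaml
  exact env_to_yaml_spec' env_list hpre
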